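-- pv_equiv track=rewrite | github.com/julianopadua/TCC | src/bdqueimadas_consolidated.py | _resolve_output_filename
-- ===== SOURCE A (Python) =====
-- from typing import Iterable, List, Optional, Tuple
--
-- def _resolve_output_filename(
--     years: Optional[Iterable[int]],
--     biome: Optional[str],
--     prefix: str = "bdq_targets",
-- ) -> str:
--     """
--     Regra:
--       - sem years   -> {prefix}_all_years[_bioma].csv
--       - 1 ano       -> {prefix}_{YYYY}[_bioma].csv
--       - multi-anos  -> {prefix}_{Y1}_{YN}[_bioma].csv
--     bioma: normalizado para snake-case lower.
--     """
--     b = ""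
--     if biome:
--         bnorm = str(biome).strip().lower().replace(" ", "_")
--         if bnorm:
--             b = f"_{bnorm}"
--
--     if not years:
--         return f"{prefix}_all_years{b}.csv"
--
--     yrs = sorted({int(y) for y in years})
--     if len(yrs) == 1:
--         return f"{prefix}_{yrs[0]}{b}.csv"
--     return f"{prefix}_{yrs[0]}_{yrs[-1]}{b}.csv"
-- ===== SOURCE B (Python) =====
-- def _resolve_output_filename(years=None, biome=None, prefix="bdq_targets"):
--     # Assemble the name as a list of parts joined by "_"; the year range comes from
--     # one pass keeping (lo, hi) instead of building a set and sorting it.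
--     parts = [prefix]
--     if not years:
--         parts.append("all_years")
--     else:
--         lo = hi = None
--         for y in years:
--             v = int(y)
--             if lo is None:
--                 lo = hi = v
--             else:
--                 lo = min(lo, v)
--                 hi = max(hi, v)
--         parts.append(str(lo) if lo == hi else f"{lo}_{hi}")
--     if biome:
--         bnorm = str(biome).strip().lower().replace(" ", "_")
--         if bnorm:
--             parts.append(bnorm)
--     return "_".join(parts) + ".csv"
-- ===== Notes on version B (the rewrite author's own statement) =====
-- stated objective: alternative
-- what changed: Instead of building a set of the years and sorting it to take its first/last element and then concatenating strings with the biome suffix precomputed up front, B makes a single pass keeping a (lo, hi) pair, assembles the filename as a list of parts (prefix, year part, optional normalized biome) and joins them with '_' at the end; it trades the O(n log n) sort for an O(n) scan, though the measured wall-clock cost is the same.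
import Mathlib
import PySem

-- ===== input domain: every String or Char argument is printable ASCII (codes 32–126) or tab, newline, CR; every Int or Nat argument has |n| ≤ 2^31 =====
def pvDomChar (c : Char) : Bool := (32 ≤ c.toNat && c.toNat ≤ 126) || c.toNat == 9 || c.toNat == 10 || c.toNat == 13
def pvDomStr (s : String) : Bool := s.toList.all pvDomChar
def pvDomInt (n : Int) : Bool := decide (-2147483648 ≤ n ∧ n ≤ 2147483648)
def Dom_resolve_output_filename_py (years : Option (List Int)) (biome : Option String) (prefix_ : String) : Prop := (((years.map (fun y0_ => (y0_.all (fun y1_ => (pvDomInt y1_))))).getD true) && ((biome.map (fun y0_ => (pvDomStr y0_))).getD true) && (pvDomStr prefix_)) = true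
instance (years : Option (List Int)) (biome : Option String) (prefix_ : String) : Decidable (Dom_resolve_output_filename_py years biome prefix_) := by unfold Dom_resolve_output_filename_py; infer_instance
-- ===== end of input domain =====

-- B replaces A's build-a-set-then-sort-and-concatenate by a single (lo,hi) pass and a
-- join of a parts list (an alternative decomposition of the same task).

-- ===== PORT A =====
def resolve_output_filename_py (years : Option (List Int)) (biome : Option String) (prefix_ : String) : String :=
  -- b = ""; if biome: bnorm = str(biome).strip().lower().replace(" ", "_"); if bnorm: b = "_" + bnorm
  let b :=
    match biome with
    | none => ""
    | some bi =>
      if bi = "" then ""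
      else
        let bnorm := PySem.Str.replace (PySem.Str.lower (PySem.Str.strip bi)) " " "_"
        if bnorm = "" then "" else "_" ++ bnorm
  match years with
  | none => prefix_ ++ "_all_years" ++ b ++ ".csv"
  | some ys =>
    if ys = [] then prefix_ ++ "_all_years" ++ b ++ ".csv"
    else
      -- yrs = sorted({int(y) for y in years})  (int(y) = y on List Int)
      let yrs := PySem.List.sorted (PySem.Set.ofList ys) (fun x => x) false
      if yrs.length = 1 then
        prefix_ ++ "_" ++ PySem.Int.toStr (PySem.List.pyGetD yrs 0 0) ++ b ++ ".csv"
      else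
        prefix_ ++ "_" ++ PySem.Int.toStr (PySem.List.pyGetD yrs 0 0) ++ "_" ++
          PySem.Int.toStr (PySem.List.pyGetD yrs (-1) 0) ++ b ++ ".csv"

-- ===== PORT B =====
def resolve_output_filename_py_alt (years : Option (List Int)) (biome : Option String) (prefix_ : String) : String :=
  -- parts = [prefix]; year part from one (lo,hi) pass; optional biome part; "_".join(parts) + ".csv"
  let parts0 : List String := [prefix_]
  let parts1 : List String :=
    match years with
    | none => parts0 ++ ["all_years"]
    | some [] => parts0 ++ ["all_years"]
    | some (v :: rest) =>
      -- loop: lo = hi = first int, then lo = min(lo, v); hi = max(hi, v)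
      let p := rest.foldl (fun (acc : Int × Int) y => (min acc.1 y, max acc.2 y)) (v, v)
      parts0 ++ [if p.1 = p.2 then PySem.Int.toStr p.1
                 else PySem.Int.toStr p.1 ++ "_" ++ PySem.Int.toStr p.2]
  let parts2 : List String :=
    match biome with
    | none => parts1
    | some bi =>
      if bi = "" then parts1
      else
        let bnorm := PySem.Str.replace (PySem.Str.lower (PySem.Str.strip bi)) " " "_"
        if bnorm = "" then parts1 else parts1 ++ [bnorm]
  PySem.Str.join "_" parts2 ++ ".csv"

-- ===== PRECONDITION & SPEC =====
def Spec_resolve_output_filename_py (years : Option (List Int)) (biome : Option String) (prefix_ : String) (out : String) : Prop := out = resolve_output_filename_py_alt years biome prefix_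
instance (years : Option (List Int)) (biome : Option String) (prefix_ : String) (out : String) : Decidable (Spec_resolve_output_filename_py years biome prefix_ out) := by unfold Spec_resolve_output_filename_py; infer_instance

-- ===== CLAIM (what is proved, stated in full; the proofs are below) =====
def Claim_equal_resolve_output_filename_py : Prop := ∀ (years : Option (List Int)) (biome : Option String) (prefix_ : String), Dom_resolve_output_filename_py years biome prefix_ → Spec_resolve_output_filename_py years biome prefix_ (resolve_output_filename_py years biome prefix_)

-- ===== LEMMAS AND PROOFS =====

-- B's pair fold is the two separate folds
theorem pv_fold_pair (t : List Int) : ∀ a b : Int,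
    t.foldl (fun (acc : Int × Int) y => (min acc.1 y, max acc.2 y)) (a, b)
      = (t.foldl min a, t.foldl max b) := by
  induction t with
  | nil => intro a b; rfl
  | cons x t ih => intro a b; simp [List.foldl, ih]

-- min/max facts about the folds
theorem pv_foldl_min_mem (h : Int) (t : List Int) : t.foldl min h ∈ h :: t := by
  have := PySem.List.min?_mem (xs := h :: t) (key := fun x => x) (m := t.foldl min h)
  exact this (by simp [PySem.List.min?_id_cons])

theorem pv_foldl_min_le (h : Int) (t : List Int) : ∀ y ∈ h :: t, t.foldl min h ≤ y := by
  have := PySem.List.min?_isMin (xs := h :: t) (key := fun x => x) (m := t.foldl min h)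
    (by simp [PySem.List.min?_id_cons])
  simpa using this

theorem pv_foldl_max_mem (h : Int) (t : List Int) : t.foldl max h ∈ h :: t := by
  have := PySem.List.max?_mem (xs := h :: t) (key := fun x => x) (m := t.foldl max h)
  exact this (by simp [PySem.List.max?_id_cons])

theorem pv_le_foldl_max (h : Int) (t : List Int) : ∀ y ∈ h :: t, y ≤ t.foldl max h := by
  have := PySem.List.max?_isMax (xs := h :: t) (key := fun x => x) (m := t.foldl max h)
    (by simp [PySem.List.max?_id_cons])
  simpa using this

-- abbreviation for A's sorted deduplicated list
def pvYrs (h : Int) (t : List Int) : List Int :=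
  PySem.List.sorted (PySem.Set.ofList (h :: t)) (fun x => x) false

theorem pv_mem_yrs (h : Int) (t : List Int) (x : Int) : x ∈ pvYrs h t ↔ x ∈ h :: t := by
  simp [pvYrs, PySem.List.mem_sorted, PySem.Set.mem_ofList]

theorem pv_yrs_ne_nil (h : Int) (t : List Int) : pvYrs h t ≠ [] := by
  intro hn
  have : h ∈ pvYrs h t := (pv_mem_yrs h t h).2 (by simp)
  simp [hn] at this

theorem pv_yrs_head (h : Int) (t : List Int) :
    PySem.List.pyGetD (pvYrs h t) 0 0 = t.foldl min h := by
  cases hs : pvYrs h t with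
  | nil => exact absurd hs (pv_yrs_ne_nil h t)
  | cons m r =>
    have hs' : PySem.List.sorted (PySem.Set.ofList (h :: t)) (fun x => x) false = m :: r := hs
    have hmle := PySem.List.key_head_sorted_le _ _ hs'
    have h1 : m ≤ t.foldl min h := by
      have := pv_foldl_min_mem h t
      simpa using hmle _ (by simpa [PySem.Set.mem_ofList] using this)
    have h2 : t.foldl min h ≤ m := by
      have hm : m ∈ h :: t := (pv_mem_yrs h t m).1 (by simp [hs])
      exact pv_foldl_min_le h t m hm
    simp [PySem.List.pyGetD_zero]
    omega

theorem pv_le_getLast {l : List Int} (hpw : l.Pairwise (· ≤ ·)) {x : Int} (hx : x ∈ l)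
    (hne : l ≠ []) : x ≤ l.getLast hne := by
  induction l with
  | nil => simp at hx
  | cons a l ih =>
    cases l with
    | nil =>
      simp at hx
      simp [hx]
    | cons b l2 =>
      rw [List.getLast_cons (by simp)]
      rcases List.mem_cons.1 hx with rfl | hx'
      · have hall : ∀ y ∈ b :: l2, x ≤ y := (List.pairwise_cons.1 hpw).1
        exact hall _ (List.getLast_mem _)
      · exact ih (List.pairwise_cons.1 hpw).2 hx' (by simp)

theorem pv_yrs_last (h : Int) (t : List Int) :
    PySem.List.pyGetD (pvYrs h t) (-1) 0 = t.foldl max h := by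
  have hne := pv_yrs_ne_nil h t
  rw [PySem.List.pyGetD_neg_one (h := hne)]
  have hLmem : (pvYrs h t).getLast hne ∈ pvYrs h t := List.getLast_mem hne
  have h1 : (pvYrs h t).getLast hne ≤ t.foldl max h :=
    pv_le_foldl_max h t _ ((pv_mem_yrs h t _).1 hLmem)
  have hpw : (pvYrs h t).Pairwise (· ≤ ·) :=
    (PySem.List.sorted_ofList_pairwise_lt (xs := h :: t)).imp (fun hab => le_of_lt hab)
  have hx : t.foldl max h ∈ pvYrs h t := (pv_mem_yrs h t _).2 (pv_foldl_max_mem h t)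
  have h2 : t.foldl max h ≤ (pvYrs h t).getLast hne := pv_le_getLast hpw hx hne
  omega

theorem pv_yrs_len_one_iff (h : Int) (t : List Int) :
    (pvYrs h t).length = 1 ↔ t.foldl min h = t.foldl max h := by
  constructor
  · intro hlen
    cases hs : pvYrs h t with
    | nil => exact absurd hs (pv_yrs_ne_nil h t)
    | cons m r =>
      have hr : r = [] := by
        have := hlen; rw [hs] at this; simpa using this
      have hhead := pv_yrs_head h t
      have hlast := pv_yrs_last h t
      rw [hs, hr] at hhead hlast
      simp [PySem.List.pyGetD_zero] at hhead
      rw [show PySem.List.pyGetD [m] (-1) 0 = m from by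
        simpa using PySem.List.pyGetD_neg_one (xs := [m]) (d := 0) (by simp)] at hlast
      omega
  · intro heq
    have hpw : (pvYrs h t).Pairwise (· < ·) :=
      PySem.List.sorted_ofList_pairwise_lt (xs := h :: t)
    cases hs : pvYrs h t with
    | nil => exact absurd hs (pv_yrs_ne_nil h t)
    | cons m r =>
      cases r with
      | nil => simp
      | cons m2 r2 =>
        exfalso
        have hlt : m < m2 := by
          rw [hs] at hpw
          exact (List.pairwise_cons.1 hpw).1 m2 (by simp)
        have hm : m ∈ h :: t := (pv_mem_yrs h t m).1 (by simp [hs])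
        have hm2 : m2 ∈ h :: t := (pv_mem_yrs h t m2).1 (by simp [hs])
        have := pv_foldl_min_le h t m hm
        have := pv_le_foldl_max h t m2 hm2
        omega

-- joining the parts list gives A's concatenations
theorem pv_join_two (a b : String) : PySem.Str.join "_" [a, b] = a ++ "_" ++ b := by
  apply String.toList_injective
  simp [PySem.Str.join, PySem.Chars.join, List.intercalate]

theorem pv_join_three (a b c : String) :
    PySem.Str.join "_" [a, b, c] = a ++ "_" ++ b ++ "_" ++ c := by
  apply String.toList_injective
  simp [PySem.Str.join, PySem.Chars.join, List.intercalate]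

-- A's output rewritten as "prefix ++ '_' ++ yearPart ++ b ++ '.csv'" matches B's join,
-- for both biome cases at once
theorem pv_assemble (prefix_ yp : String) (biome : Option String) :
    (PySem.Str.join "_"
      ((match biome with
        | none => [prefix_, yp]
        | some bi =>
          if bi = "" then [prefix_, yp]
          else
            if PySem.Str.replace (PySem.Str.lower (PySem.Str.strip bi)) " " "_" = "" then [prefix_, yp]
            else [prefix_, yp] ++ [PySem.Str.replace (PySem.Str.lower (PySem.Str.strip bi)) " " "_"])) ++ ".csv")
    = prefix_ ++ "_" ++ yp ++
      (match biome with
       | none => ""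
       | some bi =>
         if bi = "" then ""
         else
           if PySem.Str.replace (PySem.Str.lower (PySem.Str.strip bi)) " " "_" = "" then ""
           else "_" ++ PySem.Str.replace (PySem.Str.lower (PySem.Str.strip bi)) " " "_") ++ ".csv" := by
  cases biome with
  | none => rw [pv_join_two]; apply String.toList_injective; simp
  | some bi =>
    by_cases h1 : bi = ""
    · simp only [h1, if_true]; rw [pv_join_two]; apply String.toList_injective; simp
    · simp only [h1, if_false]
      by_cases h2 : PySem.Str.replace (PySem.Str.lower (PySem.Str.strip bi)) " " "_" = ""
      · simp only [h2, if_true]; rw [pv_join_two]; apply String.toList_injective; simp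
      · simp only [h2, if_false, List.cons_append, List.nil_append]
        rw [pv_join_three]; apply String.toList_injective; simp

-- ===== VERDICT (by name: the statement is the Claim_ definition above) =====
theorem resolve_output_filename_py_spec : Claim_equal_resolve_output_filename_py := by
  intro years biome prefix_ _hdom
  unfold Spec_resolve_output_filename_py resolve_output_filename_py resolve_output_filename_py_alt
  cases years with
  | none =>
    simp only []
    rw [show ([prefix_] ++ ["all_years"] : List String) = [prefix_, "all_years"] from rfl]
    rw [pv_assemble prefix_ "all_years" biome]
    apply String.toList_injective; simp
  | some ys =>
    cases ys with
    | nil =>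
      simp only [if_true]
      rw [show ([prefix_] ++ ["all_years"] : List String) = [prefix_, "all_years"] from rfl]
      rw [pv_assemble prefix_ "all_years" biome]
      apply String.toList_injective; simp
    | cons h t =>
      simp only [reduceCtorEq, if_false]
      rw [pv_fold_pair t h h]
      have hfold : (PySem.List.sorted (PySem.Set.ofList (h :: t)) (fun x => x) false) = pvYrs h t := rfl
      rw [hfold, pv_yrs_head h t, pv_yrs_last h t]
      by_cases hone : t.foldl min h = t.foldl max h
      · rw [if_pos ((pv_yrs_len_one_iff h t).2 hone), if_pos hone]
        rw [show ([prefix_] ++ [PySem.Int.toStr (t.foldl min h)] : List String)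
            = [prefix_, PySem.Int.toStr (t.foldl min h)] from rfl]
        rw [pv_assemble prefix_ (PySem.Int.toStr (t.foldl min h)) biome]
      · rw [if_neg (fun hl => hone ((pv_yrs_len_one_iff h t).1 hl)), if_neg hone]
        rw [show ([prefix_] ++ [PySem.Int.toStr (t.foldl min h) ++ "_" ++ PySem.Int.toStr (t.foldl max h)] : List String)
            = [prefix_, PySem.Int.toStr (t.foldl min h) ++ "_" ++ PySem.Int.toStr (t.foldl max h)] from rfl]
        rw [pv_assemble prefix_ (PySem.Int.toStr (t.foldl min h) ++ "_" ++ PySem.Int.toStr (t.foldl max h)) biome]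
        apply String.toList_injective; simp
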